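-- pv_equiv track=rewrite | github.com/vinay2201/learning-coach | quiz.py | _ctx_to_text
-- ===== SOURCE A (Python) =====
-- from typing import List, Dict
--
-- def _ctx_to_text(ctx: List[Dict], limit_chars: int = 2500) -> str:
--     blocks, total = [], 0
--     for c in ctx:
--         t = (c.get("text") or "").strip()
--         if not t: continue
--         if total + len(t) > limit_chars: break
--         blocks.append(t); total += len(t)
--     return "\n\n".join(blocks)
-- ===== SOURCE B (Python) =====
-- from typing import List, Dict
-- from bisect import bisect_right
--
-- def _ctx_to_text(ctx: List[Dict], limit_chars: int = 2500) -> str: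
--     # Stage 1: the cleaned, non-empty stripped blocks.
--     blocks = [t for c in ctx if (t := (c.get("text") or "").strip())]
--     # Stage 2: prefix sums of the block lengths (strictly increasing).
--     prefix = []
--     s = 0
--     for b in blocks:
--         s += len(b)
--         prefix.append(s)
--     # Stage 3: binary search for the longest prefix whose total stays <= limit.
--     # Since prefix sums are strictly increasing, the first one exceeding the
--     # limit cuts off everything after it, exactly like A's `break`.
--     k = bisect_right(prefix, limit_chars)
--     return "\n\n".join(blocks[:k])
-- ===== Notes on version B (the rewrite author's own statement) =====
-- stated objective: alternative
-- what changed: Replaces A's single stateful break-loop by three stages: build the cleaned block list, build the prefix-sum array of block lengths, and pick the cutoff index by binary search (bisect_right) over the monotone prefix sums instead of a linear scan with a running total.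
import Mathlib
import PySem

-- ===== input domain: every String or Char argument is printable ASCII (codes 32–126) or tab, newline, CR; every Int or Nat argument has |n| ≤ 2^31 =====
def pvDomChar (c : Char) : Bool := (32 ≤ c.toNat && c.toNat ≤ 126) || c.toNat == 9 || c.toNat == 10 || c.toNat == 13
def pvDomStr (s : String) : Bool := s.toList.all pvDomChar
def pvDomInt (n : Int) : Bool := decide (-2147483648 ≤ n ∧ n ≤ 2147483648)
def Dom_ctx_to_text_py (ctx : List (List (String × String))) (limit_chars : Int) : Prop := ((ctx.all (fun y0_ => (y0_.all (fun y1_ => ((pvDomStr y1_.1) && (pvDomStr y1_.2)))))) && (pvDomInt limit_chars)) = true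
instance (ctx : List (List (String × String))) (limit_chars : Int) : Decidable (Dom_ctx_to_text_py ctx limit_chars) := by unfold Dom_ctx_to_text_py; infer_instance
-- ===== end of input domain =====

-- B replaces A's stateful break-loop by three stages (clean blocks, prefix sums, bisect_right cutoff); same return value.
-- ===== PORT A =====
-- c.get("text"): first-match lookup in the association list (missing key -> ""); since the values
-- are strings, Python's `or ""` only turns "" into "", so returning the found value is exact.
def pvGetText : List (String × String) → String
  | [] => ""
  | (k, v) :: rest => if k = "text" then v else pvGetText rest

-- t = (c.get("text") or "").strip()
def pvStripText (c : List (String × String)) : String :=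
  PySem.Str.strip (pvGetText c)

-- the for-loop of A, with `break` returning the blocks collected so far
def pvCtxGo (limit : Int) : List (List (String × String)) → List String → Int → List String
  | [], blocks, _ => blocks
  | c :: cs, blocks, total =>
    if pvStripText c = "" then pvCtxGo limit cs blocks total
    else if total + PySem.Str.len (pvStripText c) > limit then blocks
    else pvCtxGo limit cs (blocks ++ [pvStripText c]) (total + PySem.Str.len (pvStripText c))

def ctx_to_text_py (ctx : List (List (String × String))) (limit_chars : Int) : String :=
  PySem.Str.join "\n\n" (pvCtxGo limit_chars ctx [] 0)

-- ===== PORT B =====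
-- stage 1: the comprehension of non-empty stripped blocks
def pvCleanBlocks (ctx : List (List (String × String))) : List String :=
  ctx.filterMap (fun c => if pvStripText c = "" then none else some (pvStripText c))

-- stage 2: Source B's prefix-sum loop (s += len(b); prefix.append(s))
def pvPrefix : List String → Int → List Int
  | [], _ => []
  | b :: bs, s => (s + PySem.Str.len b) :: pvPrefix bs (s + PySem.Str.len b)

-- stage 3: bisect.bisect_right(prefix, x), the stdlib binary search, transcribed;
-- the index mid always satisfies lo ≤ mid < hi ≤ |p|, so getD's default is never used
def pvBisectR (p : List Int) (x : Int) (lo hi : Nat) : Nat :=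
  if h : lo < hi then
    let mid := (lo + hi) / 2
    if x < p.getD mid 0 then pvBisectR p x lo mid
    else pvBisectR p x (mid + 1) hi
  else lo
termination_by hi - lo
decreasing_by all_goals omega

def ctx_to_text_py_alt (ctx : List (List (String × String))) (limit_chars : Int) : String :=
  let blocks := pvCleanBlocks ctx
  let pre := pvPrefix blocks 0
  let k := pvBisectR pre limit_chars 0 pre.length
  PySem.Str.join "\n\n" (blocks.take k)

-- ===== PRECONDITION & SPEC =====
def Spec_ctx_to_text_py (ctx : List (List (String × String))) (limit_chars : Int) (out : String) : Prop := out = ctx_to_text_py_alt ctx limit_chars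
instance (ctx : List (List (String × String))) (limit_chars : Int) (out : String) : Decidable (Spec_ctx_to_text_py ctx limit_chars out) := by unfold Spec_ctx_to_text_py; infer_instance

-- ===== CLAIM (what is proved, stated in full; the proofs are below) =====
def Claim_equal_ctx_to_text_py : Prop := ∀ (ctx : List (List (String × String))) (limit_chars : Int), Dom_ctx_to_text_py ctx limit_chars → Spec_ctx_to_text_py ctx limit_chars (ctx_to_text_py ctx limit_chars)

-- ===== LEMMAS AND PROOFS =====

-- the break-prefix of blocks as A computes it, expressed on (prefix sum, block) pairs
def pvTakeWithin (limit : Int) : List (Int × String) → List String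
  | [] => []
  | (s, b) :: rest => if s ≤ limit then b :: pvTakeWithin limit rest else []

theorem pvCleanBlocks_cons_empty (c : List (String × String)) (cs : List (List (String × String)))
    (h : pvStripText c = "") : pvCleanBlocks (c :: cs) = pvCleanBlocks cs := by
  simp [pvCleanBlocks, h]

theorem pvCleanBlocks_cons_ne (c : List (String × String)) (cs : List (List (String × String)))
    (h : ¬ pvStripText c = "") :
    pvCleanBlocks (c :: cs) = pvStripText c :: pvCleanBlocks cs := by
  simp [pvCleanBlocks, h]

-- A's break-loop equals: previously collected blocks, followed by the prefix of the cleaned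
-- remaining blocks whose prefix sums (started at the running total) stay within the limit.
theorem pvCtxGo_eq (limit : Int) (ctx : List (List (String × String))) :
    ∀ (blocks : List String) (total : Int),
      pvCtxGo limit ctx blocks total =
        blocks ++ pvTakeWithin limit
          ((pvPrefix (pvCleanBlocks ctx) total).zip (pvCleanBlocks ctx)) := by
  induction ctx with
  | nil => intro blocks total; simp [pvCleanBlocks, pvPrefix, pvTakeWithin, pvCtxGo]
  | cons c cs ih =>
    intro blocks total
    by_cases h : pvStripText c = ""
    · rw [pvCleanBlocks_cons_empty c cs h]
      simpa [pvCtxGo, h] using ih blocks total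
    · rw [pvCleanBlocks_cons_ne c cs h]
      simp only [pvPrefix, List.zip_cons_cons, pvTakeWithin]
      by_cases h2 : total + PySem.Str.len (pvStripText c) > limit
      · rw [if_neg (by omega)]
        simp only [pvCtxGo, if_neg h, if_pos h2]
        rw [List.append_nil]
      · rw [if_pos (by omega)]
        rw [show pvCtxGo limit (c :: cs) blocks total
              = pvCtxGo limit cs (blocks ++ [pvStripText c])
                  (total + PySem.Str.len (pvStripText c)) from by
                simp only [pvCtxGo, if_neg h, if_neg h2]]
        rw [ih, List.append_assoc, List.singleton_append]

theorem pvPrefix_length (bs : List String) (s : Int) : (pvPrefix bs s).length = bs.length := by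
  induction bs generalizing s with
  | nil => rfl
  | cons b bs ih => simp [pvPrefix, ih]

-- elements of the prefix-sum list grow monotonically (lengths are ≥ 0)
theorem pvPrefix_sorted (bs : List String) (s : Int) :
    ∀ i j, i ≤ j → j < (pvPrefix bs s).length →
      (pvPrefix bs s).getD i 0 ≤ (pvPrefix bs s).getD j 0 := by
  induction bs generalizing s with
  | nil => intro i j _ hj; simp [pvPrefix] at hj
  | cons b bs ih =>
    intro i j hij hj
    have hb : (0:Int) ≤ PySem.Str.len b := by
      simp [PySem.Str.len_eq]
    match i, j with
    | 0, 0 => exact le_refl _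
    | 0, j + 1 =>
      simp only [pvPrefix, List.getD_cons_zero, List.getD_cons_succ]
      -- head ≤ every element of the tail: every prefix sum of the tail starts at s + len b
      have aux : ∀ (bs : List String) (t : Int) (j : Nat), j < (pvPrefix bs t).length →
          t ≤ (pvPrefix bs t).getD j 0 := by
        intro bs
        induction bs with
        | nil => intro t j hj; simp [pvPrefix] at hj
        | cons b' bs' ih' =>
          intro t j hj
          have hb' : (0:Int) ≤ PySem.Str.len b' := by simp [PySem.Str.len_eq]
          match j with
          | 0 => simp only [pvPrefix, List.getD_cons_zero]; omega
          | j + 1 =>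
            simp only [pvPrefix, List.getD_cons_succ]
            simp only [pvPrefix, List.length_cons, Nat.add_lt_add_iff_right] at hj
            have := ih' (t + PySem.Str.len b') j hj
            omega
      simp only [pvPrefix, List.length_cons, Nat.add_lt_add_iff_right] at hj
      exact aux bs (s + PySem.Str.len b) j hj
    | i + 1, j + 1 =>
      simp only [pvPrefix, List.getD_cons_succ]
      simp only [pvPrefix, List.length_cons, Nat.add_lt_add_iff_right] at hj
      exact ih (s + PySem.Str.len b) i j (by omega) hj

-- invariant correctness of the binary search: the result r keeps p[i] ≤ x for i < r
-- and x < p[i] for r ≤ i < |p|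
theorem pvBisectR_inv (p : List Int) (x : Int)
    (hs : ∀ i j, i ≤ j → j < p.length → p.getD i 0 ≤ p.getD j 0) :
    ∀ n lo hi, hi - lo = n → lo ≤ hi → hi ≤ p.length →
      (∀ i, i < lo → p.getD i 0 ≤ x) → (∀ i, hi ≤ i → i < p.length → x < p.getD i 0) →
      (pvBisectR p x lo hi ≤ p.length) ∧
      (∀ i, i < pvBisectR p x lo hi → p.getD i 0 ≤ x) ∧
      (∀ i, pvBisectR p x lo hi ≤ i → i < p.length → x < p.getD i 0) := by
  intro n
  induction n using Nat.strong_induction_on with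
  | _ n IH =>
    intro lo hi hn hlh hhp hlo hhi
    rw [pvBisectR]
    by_cases h : lo < hi
    · rw [dif_pos h]
      set mid := (lo + hi) / 2 with hmid
      have hmb : lo ≤ mid ∧ mid < hi := by omega
      by_cases hc : x < p.getD mid 0
      · rw [if_pos hc]
        refine IH (mid - lo) (by omega) lo mid rfl (by omega) (by omega) hlo ?_
        intro i hmi hip
        exact lt_of_lt_of_le hc (hs mid i hmi (by omega))
      · rw [if_neg hc]
        refine IH (hi - (mid + 1)) (by omega) (mid + 1) hi rfl (by omega) hhp ?_ hhi
        intro i hi1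
        exact le_trans (hs i mid (by omega) (by omega)) (by omega)
    · rw [dif_neg h]
      have : lo = hi := by omega
      subst this
      exact ⟨hhp, hlo, hhi⟩

-- pvTakeWithin over the zipped (prefix sum, block) list is `take k` for any k with the
-- cut properties above
theorem pvTakeWithin_eq_take (limit : Int) :
    ∀ (ps : List Int) (bs : List String) (k : Nat), ps.length = bs.length →
      (∀ i, i < k → ps.getD i 0 ≤ limit) → (∀ i, k ≤ i → i < ps.length → limit < ps.getD i 0) →
      pvTakeWithin limit (ps.zip bs) = bs.take k := by
  intro ps
  induction ps with
  | nil =>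
    intro bs k hlen _ _
    have hb : bs = [] := by simpa using (List.length_eq_zero_iff.mp hlen.symm)
    simp [pvTakeWithin, hb]
  | cons s ps ih =>
    intro bs k hlen h1 h2
    match bs with
    | [] => simp at hlen
    | b :: bs =>
      simp only [List.zip_cons_cons, pvTakeWithin]
      match k with
      | 0 =>
        rw [if_neg (by have := h2 0 (by omega) (by simp); simp only [List.getD_cons_zero] at this; omega)]
        simp
      | k + 1 =>
        rw [if_pos (by have := h1 0 (by omega); simpa using this)]
        simp only [List.take_succ_cons]
        congr 1
        refine ih bs k (by simpa using hlen) ?_ ?_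
        · intro i hik; have := h1 (i + 1) (by omega); simpa using this
        · intro i hik hip; have := h2 (i + 1) (by omega) (by simpa using Nat.add_lt_add_right hip 1)
          simpa using this

-- ===== VERDICT (by name: the statement is the Claim_ definition above) =====
theorem ctx_to_text_py_spec : Claim_equal_ctx_to_text_py := by
  intro ctx limit _
  unfold Spec_ctx_to_text_py ctx_to_text_py ctx_to_text_py_alt
  rw [pvCtxGo_eq, List.nil_append]
  congr 1
  set bs := pvCleanBlocks ctx
  set ps := pvPrefix bs 0 with hps
  have hlen : ps.length = bs.length := pvPrefix_length bs 0
  have hsorted := pvPrefix_sorted bs 0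
  obtain ⟨_, h1, h2⟩ := pvBisectR_inv ps limit (by simpa [← hps] using hsorted)
    (ps.length - 0) 0 ps.length rfl (by omega) le_rfl (by omega) (by omega)
  exact pvTakeWithin_eq_take limit ps bs _ hlen h1 h2
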